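-- pv_equiv track=rewrite | github.com/LogCreative/PGFPlotsEdt | ppedt_server_llm.py | code_filter
-- ===== SOURCE A (Python) =====
-- CODE_BEGIN_IDENTIFIER = "\\documentclass"
--
-- def code_filter(gen):
--     # filter the explanation part by finding \documentclass
--     full_code = ""
--     for delta in gen:
--         if full_code is not None:
--             full_code += delta
--             if full_code.find(CODE_BEGIN_IDENTIFIER) != -1:
--                 start_code = full_code[full_code.index(CODE_BEGIN_IDENTIFIER):]
--                 full_code = None
--                 yield start_code
--         else:
--             yield delta
-- ===== SOURCE B (Python) =====
-- CODE_BEGIN_IDENTIFIER = "\\documentclass"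
--
-- def code_filter(gen):
--     # Two phases on one iterator: a search loop that keeps only a short tail
--     # buffer until the identifier is seen, then the suffix is yielded and the
--     # remaining chunks are passed through untouched with `yield from`.
--     it = iter(gen)
--     tail = ""
--     for delta in it:
--         buf = tail + delta
--         i = buf.find(CODE_BEGIN_IDENTIFIER)
--         if i != -1:
--             yield buf[i:]
--             yield from it
--             return
--         tail = buf[-(len(CODE_BEGIN_IDENTIFIER) - 1):]
-- ===== Notes on version B (the rewrite author's own statement) =====
-- stated objective: faster
-- what changed: Replaces A's ever-growing accumulator that is rescanned on every chunk by a two-phase pass: a search loop keeping only a 13-char tail buffer to find the identifier across chunk boundaries, then the remaining chunks are passed through unchanged.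
import Mathlib
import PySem

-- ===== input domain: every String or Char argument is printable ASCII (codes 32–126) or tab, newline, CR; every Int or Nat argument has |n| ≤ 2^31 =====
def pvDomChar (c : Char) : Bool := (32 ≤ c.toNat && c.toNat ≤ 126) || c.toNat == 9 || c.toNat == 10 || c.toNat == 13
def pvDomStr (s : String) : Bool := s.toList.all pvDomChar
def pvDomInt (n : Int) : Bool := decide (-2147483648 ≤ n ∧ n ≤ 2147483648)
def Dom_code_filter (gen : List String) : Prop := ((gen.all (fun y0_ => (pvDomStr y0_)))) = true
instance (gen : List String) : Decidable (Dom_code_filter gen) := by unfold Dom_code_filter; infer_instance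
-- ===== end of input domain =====

-- B replaces A's ever-growing accumulator (rescanned on every chunk) by a two-phase pass:
-- a search loop keeping only a 13-char tail buffer, then the remaining chunks pass through unchanged.


def CODE_BEGIN_IDENTIFIER : List Char := "\\documentclass".toList

-- ===== PORT A =====
-- state: some full_code (still filtering) / none (identifier already emitted)
def codeFilterAGo : Option (List Char) → List (List Char) → List (List Char)
  | some fc, d :: rest =>
      let fc' := fc ++ d
      if PySem.Chars.find fc' CODE_BEGIN_IDENTIFIER ≠ -1 then
        PySem.Chars.slice fc' (some (PySem.Chars.find fc' CODE_BEGIN_IDENTIFIER)) none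
          :: codeFilterAGo none rest
      else codeFilterAGo (some fc') rest
  | none, d :: rest => d :: codeFilterAGo none rest
  | _, [] => []

def code_filter (gen : List String) : List String :=
  (codeFilterAGo (some []) (gen.map String.toList)).map (fun l => String.ofList l)

-- ===== PORT B =====
-- phase 1: the search loop; returns the suffix to yield and the untouched remaining chunks
def codeFilterFind (tl : List Char) : List String → Option (List Char × List String)
  | [] => none
  | d :: rest =>
      let buf := tl ++ d.toList
      let i := PySem.Chars.find buf CODE_BEGIN_IDENTIFIER
      if i ≠ -1 then some (PySem.Chars.slice buf (some i) none, rest)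
      else codeFilterFind (PySem.Chars.slice buf (some (-13)) none) rest

def code_filter_alt (gen : List String) : List String :=
  match codeFilterFind [] gen with
  | none => []
  | some (s, rest) => String.ofList s :: rest

-- ===== PRECONDITION & SPEC =====
def Spec_code_filter (gen : List String) (out : List String) : Prop := out = code_filter_alt gen
instance (gen : List String) (out : List String) : Decidable (Spec_code_filter gen out) := by unfold Spec_code_filter; infer_instance

-- ===== CLAIM (what is proved, stated in full; the proofs are below) =====
def Claim_equal_code_filter : Prop := ∀ (gen : List String), Dom_code_filter gen → Spec_code_filter gen (code_filter gen)

-- ===== LEMMAS AND PROOFS =====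

-- a pattern that is a prefix of x ++ y and fits inside x is a prefix of x
lemma prefix_append_left_of_length_le {α : Type} (p x y : List α)
    (h : p <+: x ++ y) (hl : p.length ≤ x.length) : p <+: x := by
  rw [List.prefix_iff_eq_take] at h ⊢
  rwa [List.take_append_of_le_length hl] at h

lemma drop_shift {α : Type} (p buf : List α) (i : Nat) :
    (p ++ buf).drop (p.length + i) = buf.drop i := by
  rw [List.drop_append]
  simp

-- no occurrence of the identifier can start strictly inside the dropped prefix p
lemma no_early_occurrence (p tl d : List Char)
    (hacc : ¬ CODE_BEGIN_IDENTIFIER <:+: (p ++ tl))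
    (htl : p = [] ∨ tl.length = 13) (j : Nat) (hj : j < p.length) :
    ¬ CODE_BEGIN_IDENTIFIER <+: ((p ++ tl) ++ d).drop j := by
  intro hpre
  rcases htl with h | h
  · subst h; simp at hj
  · have hlen : CODE_BEGIN_IDENTIFIER.length = 14 := by rfl
    have hfit : CODE_BEGIN_IDENTIFIER.length ≤ ((p ++ tl).drop j).length := by
      simp only [hlen, List.length_drop, List.length_append]
      omega
    have hsub : CODE_BEGIN_IDENTIFIER <+: (p ++ tl).drop j := by
      refine prefix_append_left_of_length_le _ _ d ?_ hfit
      rwa [← List.drop_append_of_le_length (by simp; omega)]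
    exact hacc (List.infix_iff_prefix_suffix.mpr ⟨_, hsub, List.drop_suffix j _⟩)

-- find over the full accumulator vs find over the 13-char tail buffer
lemma find_tail_shift (p tl d : List Char)
    (hacc : ¬ CODE_BEGIN_IDENTIFIER <:+: (p ++ tl)) (htl : p = [] ∨ tl.length = 13) :
    PySem.Chars.find ((p ++ tl) ++ d) CODE_BEGIN_IDENTIFIER =
      if PySem.Chars.find (tl ++ d) CODE_BEGIN_IDENTIFIER = -1 then -1
      else (p.length : Int) + PySem.Chars.find (tl ++ d) CODE_BEGIN_IDENTIFIER := by
  have hshift : ∀ i : Nat,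
      (CODE_BEGIN_IDENTIFIER <+: ((p ++ tl) ++ d).drop (p.length + i)) ↔
        CODE_BEGIN_IDENTIFIER <+: (tl ++ d).drop i := by
    intro i; rw [List.append_assoc, drop_shift]
  have hno : ∀ j < p.length, ¬ CODE_BEGIN_IDENTIFIER <+: ((p ++ tl) ++ d).drop j :=
    fun j hj => no_early_occurrence p tl d hacc htl j hj
  by_cases hfb : PySem.Chars.find (tl ++ d) CODE_BEGIN_IDENTIFIER = -1
  · rw [if_pos hfb]
    rw [PySem.Chars.find_eq_neg_one_iff] at hfb ⊢
    intro hinf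
    obtain ⟨j, hj⟩ := (PySem.Chars.exists_prefix_drop_iff_isIn CODE_BEGIN_IDENTIFIER _).mpr
      ((PySem.Chars.isIn_iff_infix _ _).mpr hinf)
    by_cases hjp : j < p.length
    · exact hno j hjp hj
    · have hj' : CODE_BEGIN_IDENTIFIER <+: (tl ++ d).drop (j - p.length) := by
        have h := hshift (j - p.length)
        rw [Nat.add_sub_cancel' (Nat.le_of_not_lt hjp)] at h
        exact h.mp hj
      exact hfb ((PySem.Chars.isIn_iff_infix _ _).mp
        ((PySem.Chars.exists_prefix_drop_iff_isIn _ _).mp ⟨_, hj'⟩))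
  · rw [if_neg hfb]
    have h0 : 0 ≤ PySem.Chars.find (tl ++ d) CODE_BEGIN_IDENTIFIER := by
      have := PySem.Chars.neg_one_le_find (tl ++ d) CODE_BEGIN_IDENTIFIER; omega
    obtain ⟨hp1, hp2⟩ := PySem.Chars.find_spec h0
    have hpre : CODE_BEGIN_IDENTIFIER <+:
        ((p ++ tl) ++ d).drop (p.length + (PySem.Chars.find (tl ++ d) CODE_BEGIN_IDENTIFIER).toNat) :=
      (hshift _).mpr hp1
    have hmin : ∀ m < p.length + (PySem.Chars.find (tl ++ d) CODE_BEGIN_IDENTIFIER).toNat,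
        ¬ CODE_BEGIN_IDENTIFIER <+: ((p ++ tl) ++ d).drop m := by
      intro m hm
      by_cases hmp : m < p.length
      · exact hno m hmp
      · intro hc
        have h := hshift (m - p.length)
        rw [Nat.add_sub_cancel' (Nat.le_of_not_lt hmp)] at h
        exact hp2 _ (by omega) (h.mp hc)
    have hinf : CODE_BEGIN_IDENTIFIER <:+: ((p ++ tl) ++ d) :=
      List.infix_iff_prefix_suffix.mpr ⟨_, hpre, List.drop_suffix _ _⟩
    have hne : PySem.Chars.find ((p ++ tl) ++ d) CODE_BEGIN_IDENTIFIER ≠ -1 := by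
      rw [Ne, PySem.Chars.find_eq_neg_one_iff]
      exact fun h => h hinf
    have h0f : 0 ≤ PySem.Chars.find ((p ++ tl) ++ d) CODE_BEGIN_IDENTIFIER := by
      have := PySem.Chars.neg_one_le_find ((p ++ tl) ++ d) CODE_BEGIN_IDENTIFIER; omega
    obtain ⟨hq1, hq2⟩ := PySem.Chars.find_spec h0f
    have heq : (PySem.Chars.find ((p ++ tl) ++ d) CODE_BEGIN_IDENTIFIER).toNat =
        p.length + (PySem.Chars.find (tl ++ d) CODE_BEGIN_IDENTIFIER).toNat := by
      rcases lt_trichotomy (PySem.Chars.find ((p ++ tl) ++ d) CODE_BEGIN_IDENTIFIER).toNat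
          (p.length + (PySem.Chars.find (tl ++ d) CODE_BEGIN_IDENTIFIER).toNat) with h | h | h
      · exact absurd hq1 (hmin _ h)
      · exact h
      · exact absurd hpre (hq2 _ h)
    omega

-- the suffix yielded from the full accumulator equals the one from the buffer
lemma slice_tail_shift (p tl d : List Char) (i : Nat) :
    PySem.Chars.slice ((p ++ tl) ++ d) (some ((p.length : Int) + (i : Int))) none =
      PySem.Chars.slice (tl ++ d) (some (i : Int)) none := by
  rw [List.append_assoc]
  unfold PySem.Chars.slice
  rw [PySem.List.slice_from _ (by positivity), PySem.List.slice_from _ (by positivity)]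
  have h : ((p.length : Int) + (i : Int)).toNat = p.length + i := by omega
  rw [h, Int.toNat_natCast, drop_shift]

-- tail maintenance: last 13 of (p ++ tl ++ d) = last 13 of (tl ++ d) when tl is a maximal ≤13 tail
lemma tail_step (p tl d : List Char) (htl : tl.length = min 13 (p.length + tl.length)) :
    ((p ++ tl) ++ d).drop (((p ++ tl) ++ d).length - 13) =
      (tl ++ d).drop ((tl ++ d).length - 13) := by
  rcases p with _ | ⟨a, q⟩
  · simp
  · have h13 : tl.length = 13 := by simp at htl; omega
    rw [List.append_assoc]
    have hlen : ((a :: q) ++ (tl ++ d)).length - 13 = (a :: q).length + ((tl ++ d).length - 13) := by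
      simp only [List.length_append, List.length_cons]
      omega
    rw [hlen, drop_shift]

-- after the identifier was emitted, A just passes chunks through
lemma goNone_id (l : List (List Char)) : codeFilterAGo none l = l := by
  induction l with
  | nil => rfl
  | cons d rest ih => simp [codeFilterAGo, ih]

-- A's filtered stream vs B's (suffix, rest) split
lemma go_eq (gen : List String) : ∀ acc : List Char,
    ¬ CODE_BEGIN_IDENTIFIER <:+: acc →
    (codeFilterAGo (some acc) (gen.map String.toList)).map (fun l => String.ofList l) =
      match codeFilterFind (acc.drop (acc.length - 13)) gen with
      | none => []
      | some (s, rest) => String.ofList s :: rest := by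
  induction gen with
  | nil => intro acc _; rfl
  | cons d rest ih =>
    intro acc hacc
    set p := acc.take (acc.length - 13) with hp
    set tl := acc.drop (acc.length - 13) with htl
    have hsplit : acc = p ++ tl := (List.take_append_drop _ _).symm
    have htlor : p = [] ∨ tl.length = 13 := by
      by_cases h : acc.length ≤ 13
      · left; rw [hp, Nat.sub_eq_zero_of_le h, List.take_zero]
      · right; rw [htl, List.length_drop]; omega
    have hacc' : ¬ CODE_BEGIN_IDENTIFIER <:+: (p ++ tl) := by rw [← hsplit]; exact hacc
    have hfind := find_tail_shift p tl d.toList hacc' htlor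
    rw [← hsplit] at hfind
    simp only [List.map_cons, codeFilterAGo, codeFilterFind]
    by_cases hfb : PySem.Chars.find (tl ++ d.toList) CODE_BEGIN_IDENTIFIER = -1
    · have hA : PySem.Chars.find (acc ++ d.toList) CODE_BEGIN_IDENTIFIER = -1 := by
        rw [hfind, if_pos hfb]
      rw [if_neg (by simp [hA]), if_neg (by simp [hfb])]
      have hacc'' : ¬ CODE_BEGIN_IDENTIFIER <:+: (acc ++ d.toList) := by
        rw [PySem.Chars.find_eq_neg_one_iff] at hA; exact hA
      rw [ih (acc ++ d.toList) hacc'']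
      have htail : (acc ++ d.toList).drop ((acc ++ d.toList).length - 13) =
          PySem.Chars.slice (tl ++ d.toList) (some (-13)) none := by
        unfold PySem.Chars.slice
        rw [PySem.List.slice_from_neg_ofNat (tl ++ d.toList) 13 (by omega)]
        have hmin : tl.length = min 13 (p.length + tl.length) := by
          rw [htl, hp, List.length_drop, List.length_take]
          omega
        rw [hsplit]
        exact tail_step p tl d.toList hmin
      rw [htail]
    · have h0 : 0 ≤ PySem.Chars.find (tl ++ d.toList) CODE_BEGIN_IDENTIFIER := by
        have := PySem.Chars.neg_one_le_find (tl ++ d.toList) CODE_BEGIN_IDENTIFIER; omega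
      have hA : PySem.Chars.find (acc ++ d.toList) CODE_BEGIN_IDENTIFIER =
          (p.length : Int) + PySem.Chars.find (tl ++ d.toList) CODE_BEGIN_IDENTIFIER := by
        rw [hfind, if_neg hfb]
      rw [if_pos (show PySem.Chars.find (acc ++ d.toList) CODE_BEGIN_IDENTIFIER ≠ -1 by
          rw [hA]; omega),
        if_pos (show PySem.Chars.find (tl ++ d.toList) CODE_BEGIN_IDENTIFIER ≠ -1 from hfb)]
    -- A yields the suffix then passes the rest through; B returns the split pair
      rw [List.map_cons, goNone_id]
      have hslice : PySem.Chars.slice (acc ++ d.toList)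
          (some (PySem.Chars.find (acc ++ d.toList) CODE_BEGIN_IDENTIFIER)) none =
          PySem.Chars.slice (tl ++ d.toList)
          (some (PySem.Chars.find (tl ++ d.toList) CODE_BEGIN_IDENTIFIER)) none := by
        rw [hA, hsplit]
        have h := slice_tail_shift p tl d.toList
          (PySem.Chars.find (tl ++ d.toList) CODE_BEGIN_IDENTIFIER).toNat
        rw [Int.toNat_of_nonneg h0] at h
        exact h
      rw [hslice]
      simp [List.map_id'']

-- ===== VERDICT (by name: the statement is the Claim_ definition above) =====
theorem code_filter_spec : Claim_equal_code_filter := by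
  intro gen _
  unfold Spec_code_filter code_filter code_filter_alt
  have h := go_eq gen [] (by simp [CODE_BEGIN_IDENTIFIER])
  simp only [List.length_nil, Nat.zero_sub, List.drop_nil] at h
  rw [h]
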